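-- pv_equiv track=rewrite | github.com/rg98/aoc2020 | 15/code_one.py | last_time
-- ===== SOURCE A (Python) =====
-- def last_time(n, numbers):
--     _first = None
--     _next = None
--     for i, num in enumerate(reversed(numbers)):
--         if num == n:
--             if _first == None:
--                 _first = i
--             else:
--                 _next = i
--                 return (_first, _next)
--
--     return (0, None)
-- ===== SOURCE B (Python) =====
-- def last_time(n, numbers):
--     prev = last = None
--     for i, num in enumerate(numbers):
--         if num == n:
--             prev, last = last, i
--     if prev is None:
--         return (0, None)
--     m = len(numbers) - 1
--     return (m - last, m - prev)
-- ===== Notes on version B (the rewrite author's own statement) =====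
-- stated objective: alternative
-- what changed: Instead of A's early-exit backward scan over reversed(numbers), B makes one forward pass over numbers tracking the forward indices of the last two occurrences of n, and converts them to from-the-end positions arithmetically (m - last, m - prev) at the end.
import Mathlib
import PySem

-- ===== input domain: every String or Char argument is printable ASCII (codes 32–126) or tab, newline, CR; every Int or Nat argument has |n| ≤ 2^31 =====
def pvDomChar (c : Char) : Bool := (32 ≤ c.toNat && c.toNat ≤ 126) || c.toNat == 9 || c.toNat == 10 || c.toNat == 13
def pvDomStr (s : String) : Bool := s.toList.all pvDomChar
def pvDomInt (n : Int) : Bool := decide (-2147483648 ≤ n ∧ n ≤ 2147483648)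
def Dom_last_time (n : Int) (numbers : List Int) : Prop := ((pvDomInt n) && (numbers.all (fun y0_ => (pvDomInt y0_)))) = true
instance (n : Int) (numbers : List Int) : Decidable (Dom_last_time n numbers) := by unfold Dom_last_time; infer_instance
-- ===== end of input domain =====

-- B replaces A's early-exit scan over reversed(numbers) by a single FORWARD pass that
-- tracks the last two forward indices of n, converting them to from-the-end positions
-- by arithmetic at the end (alternative decomposition, same O(n) cost).


-- ===== PORT A =====
-- A's loop: for i, num in enumerate(reversed(numbers)), carrying the _first state,
-- returning early when the second occurrence is found.
def last_time_go (n : Int) : List Int → Nat → Option Nat → Option Int × Option Int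
  | [], _, _ => (some 0, none)
  | num :: rest, i, first =>
    if num == n then
      match first with
      | none => last_time_go n rest (i + 1) (some i)
      | some f => (some (f : Int), some (i : Int))
    else last_time_go n rest (i + 1) first

def last_time (n : Int) (numbers : List Int) : Option Int × Option Int :=
  last_time_go n numbers.reverse 0 none

-- ===== PORT B =====
-- Source B: one forward pass 'for i, num in enumerate(numbers): if num == n: prev, last = last, i',
-- then 'if prev is None: return (0, None)' else '(m - last, m - prev)' with m = len - 1.
-- (When prev is set the loop has necessarily also set last, so the remaining match arm
-- '(some _, none)' is unreachable and folded into the prev-is-None fallback.)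
def last_time_alt (n : Int) (numbers : List Int) : Option Int × Option Int :=
  let st := (PySem.List.enumerate numbers).foldl
      (fun (s : Option Int × Option Int) p => if p.2 == n then (s.2, some p.1) else s)
      (none, none)
  match st with
  | (some prev, some last) =>
      let m : Int := (numbers.length : Int) - 1
      (some (m - last), some (m - prev))
  | _ => (some 0, none)

-- ===== PRECONDITION & SPEC =====
def Spec_last_time (n : Int) (numbers : List Int) (out : Option Int × Option Int) : Prop := out = last_time_alt n numbers
instance (n : Int) (numbers : List Int) (out : Option Int × Option Int) : Decidable (Spec_last_time n numbers out) := by unfold Spec_last_time; infer_instance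

-- ===== CLAIM (what is proved, stated in full; the proofs are below) =====
def Claim_equal_last_time : Prop := ∀ (n : Int) (numbers : List Int), Dom_last_time n numbers → Spec_last_time n numbers (last_time n numbers)

-- ===== LEMMAS AND PROOFS =====

-- A's recursion with _first already set: the result is determined by the first occurrence.
theorem last_time_go_some (n : Int) (l : List Int) (i f : Nat) :
    last_time_go n l i (some f) =
      match PySem.List.index? l n with
      | none => (some 0, none)
      | some j => (some (f : Int), some ((i + j : Nat) : Int)) := by
  induction l generalizing i with
  | nil => simp [last_time_go, PySem.List.index?]
  | cons x xs ih =>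
    by_cases hx : x = n
    · subst hx
      rw [PySem.List.index?_cons_self]
      simp [last_time_go]
    · rw [PySem.List.index?_cons_of_ne xs hx]
      simp only [last_time_go, beq_iff_eq, if_neg hx, ih]
      cases h : PySem.List.index? xs n with
      | none => simp
      | some j => simp; omega

-- A's recursion from the initial state, characterised by the first two occurrences.
theorem last_time_go_none (n : Int) (l : List Int) (i : Nat) :
    last_time_go n l i none =
      match PySem.List.index? l n with
      | none => (some 0, none)
      | some j =>
        match PySem.List.index? (l.drop (j + 1)) n with
        | none => (some 0, none)
        | some k => (some ((i + j : Nat) : Int), some ((i + j + 1 + k : Nat) : Int)) := by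
  induction l generalizing i with
  | nil => simp [last_time_go, PySem.List.index?]
  | cons x xs ih =>
    by_cases hx : x = n
    · subst hx
      rw [PySem.List.index?_cons_self]
      simp only [last_time_go, beq_self_eq_true, if_pos, List.drop_succ_cons, List.drop_zero]
      rw [last_time_go_some]
      cases h : PySem.List.index? xs x with
      | none => simp
      | some k => simp [Nat.add_comm]
    · rw [PySem.List.index?_cons_of_ne xs hx]
      simp only [last_time_go, beq_iff_eq, if_neg hx, ih]
      cases h : PySem.List.index? xs n with
      | none => simp
      | some j =>
        simp only [Option.map_some]
        have : (x :: xs).drop (j + 1 + 1) = xs.drop (j + 1) := by simp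
        rw [this]
        cases hk : PySem.List.index? (xs.drop (j + 1)) n with
        | none => simp
        | some k => simp; omega

-- B's forward fold, characterised by the first two occurrences in the REVERSED list:
-- the loop's (prev, last) are the forward indices of the second-to-last / last occurrence.
theorem alt_fold_char (n : Int) (l : List Int) :
    ((PySem.List.enumerate l).foldl
      (fun (s : Option Int × Option Int) p => if p.2 == n then (s.2, some p.1) else s)
      (none, none)) =
      match PySem.List.index? l.reverse n with
      | none => (none, none)
      | some j =>
        match PySem.List.index? (l.reverse.drop (j + 1)) n with
        | none => (none, some ((l.length : Int) - 1 - j))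
        | some k => (some ((l.length : Int) - 1 - (j + 1 + k)), some ((l.length : Int) - 1 - j)) := by
  induction l using List.reverseRecOn with
  | nil => simp [PySem.List.enumerate, PySem.List.index?]
  | append_singleton ys x ih =>
    rw [PySem.List.enumerate_append, List.foldl_append, ih]
    simp only [List.reverse_append, List.reverse_singleton, List.singleton_append,
      PySem.List.enumerate, List.foldl_cons, List.foldl_nil, List.length_append,
      List.length_singleton, zero_add]
    by_cases hx : x = n
    · subst hx
      rw [PySem.List.index?_cons_self]
      simp only [beq_self_eq_true, if_pos, Nat.zero_add, List.drop_succ_cons, List.drop_zero]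
      cases h : PySem.List.index? ys.reverse x with
      | none =>
        simp only [Prod.mk.injEq, Option.some.injEq, Nat.cast_zero, true_and]
        omega
      | some k =>
        cases hk : PySem.List.index? (List.drop (k + 1) ys.reverse) x with
        | none =>
          simp only [Prod.mk.injEq, Option.some.injEq, Nat.cast_zero]
          rw [hk]
          simp only [Option.some.injEq]
          omega
        | some k2 =>
          simp only [Prod.mk.injEq, Option.some.injEq, Nat.cast_zero]
          rw [hk]
          simp only [Option.some.injEq]
          omega
    · rw [PySem.List.index?_cons_of_ne _ hx]
      simp only [beq_iff_eq, if_neg hx]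
      cases h : PySem.List.index? ys.reverse n with
      | none => simp
      | some j =>
        simp only [Option.map_some, List.drop_succ_cons]
        cases hk : PySem.List.index? (List.drop (j + 1) ys.reverse) n with
        | none =>
          simp only [Prod.mk.injEq, Option.some.injEq, true_and]
          omega
        | some k =>
          simp only [Prod.mk.injEq, Option.some.injEq]
          constructor <;> omega

-- ===== VERDICT (by name: the statement is the Claim_ definition above) =====
theorem last_time_spec : Claim_equal_last_time := by
  intro n numbers _
  unfold Spec_last_time last_time last_time_alt
  rw [last_time_go_none, alt_fold_char]
  cases h : PySem.List.index? numbers.reverse n with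
  | none => rfl
  | some j =>
    cases hk : PySem.List.index? (numbers.reverse.drop (j + 1)) n with
    | none => simp only [hk]
    | some k =>
      simp only [hk, Nat.zero_add, Prod.mk.injEq, Option.some.injEq]
      constructor <;> omega
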